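-- pv_equiv track=rewrite | github.com/AlixPa/AtCoder-fafbaui | base_code/math/lists.py | lsOfLsNonUnique
-- ===== SOURCE A (Python) =====
-- def lsOfLsNonUnique(ls):
--   '''
--   Returns sub lists each containing the lists of non-unique numbers
--   [1, 2, 2, 3, 4, 4, 4] => [[2, 2], [4, 4, 4]]
--   '''
--   ls = ls.copy()
--   #ls.sort()
--   if len(ls) <= 1:
--     return [ls]
--   last = ls[0]
--   ls_of_ls = list()
--   tmp_ls = [ls[0]]
--   for k in ls[1:]:
--     if k == last:
--       tmp_ls.append(k)
--     else:
--       last = k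
--       if len(tmp_ls) > 1:
--         ls_of_ls.append(tmp_ls)
--       tmp_ls = [k]
--   if len(tmp_ls) > 1:
--     ls_of_ls.append(tmp_ls)
--   return ls_of_ls
-- ===== SOURCE B (Python) =====
-- def lsOfLsNonUnique(ls):
--   # Two staged passes: first compute the run boundaries (indices where the value
--   # changes, framed by 0 and len(ls)), then slice the list at consecutive
--   # boundary pairs and keep the slices longer than 1.
--   ls = ls.copy()
--   if len(ls) <= 1:
--     return [ls]
--   bounds = [0] + [i + 1 for i, (a, b) in enumerate(zip(ls, ls[1:])) if a != b] + [len(ls)]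
--   return [ls[a:b] for a, b in zip(bounds, bounds[1:]) if b - a > 1]
-- ===== Notes on version B (the rewrite author's own statement) =====
-- stated objective: alternative
-- what changed: B replaces A's stateful single pass (last/tmp_ls with flush-on-change) by two staged passes: it first computes the list of run boundaries (indices where adjacent elements differ, framed by 0 and len(ls)) and then slices the list at consecutive boundary pairs, keeping the slices of length > 1.
import Mathlib
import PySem

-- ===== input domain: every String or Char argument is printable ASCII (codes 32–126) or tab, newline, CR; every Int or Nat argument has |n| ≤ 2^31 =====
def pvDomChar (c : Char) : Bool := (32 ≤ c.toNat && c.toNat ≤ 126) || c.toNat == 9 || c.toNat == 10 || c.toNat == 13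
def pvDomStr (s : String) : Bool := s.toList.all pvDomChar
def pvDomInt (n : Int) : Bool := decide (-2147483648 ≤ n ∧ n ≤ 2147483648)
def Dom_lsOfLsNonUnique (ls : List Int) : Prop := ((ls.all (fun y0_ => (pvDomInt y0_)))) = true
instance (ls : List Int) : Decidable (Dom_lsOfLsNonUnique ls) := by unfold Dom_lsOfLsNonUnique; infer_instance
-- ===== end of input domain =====

-- B computes the run boundaries in one pass and slices the list at consecutive boundary pairs
-- in a second pass, instead of A's stateful last/tmp_ls accumulation; same return value everywhere.
-- A copies its argument and does not mutate it observably.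

-- ===== PORT A =====
-- loop body: state (last, ls_of_ls, tmp_ls)
def stepA (s : Int × List (List Int) × List Int) (k : Int) : Int × List (List Int) × List Int :=
  if k == s.1 then (s.1, s.2.1, s.2.2 ++ [k])
  else (k, if s.2.2.length > 1 then s.2.1 ++ [s.2.2] else s.2.1, [k])

def lsOfLsNonUnique (ls : List Int) : List (List Int) :=
  if ls.length ≤ 1 then [ls]
  else
    match ls with
    | [] => [ls]   -- unreachable: length ≥ 2
    | h :: t =>
      let st := t.foldl stepA (h, ([] : List (List Int)), [h])
      if st.2.2.length > 1 then st.2.1 ++ [st.2.2] else st.2.1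

-- ===== PORT B =====
def lsOfLsNonUnique_alt (ls : List Int) : List (List Int) :=
  if ls.length ≤ 1 then [ls]
  else
    let bounds : List Int :=
      0 :: ((PySem.List.enumerate (ls.zip (PySem.List.slice ls (some 1) none)) 0).filter
              (fun p => p.2.1 != p.2.2)).map (fun p => p.1 + 1) ++ [(ls.length : Int)]
    ((bounds.zip (PySem.List.slice bounds (some 1) none)).filter (fun p => p.2 - p.1 > 1)).map
      (fun p => PySem.List.slice ls (some p.1) (some p.2))

-- ===== PRECONDITION & SPEC =====
def Spec_lsOfLsNonUnique (ls : List Int) (out : List (List Int)) : Prop := out = lsOfLsNonUnique_alt ls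
instance (ls : List Int) (out : List (List Int)) : Decidable (Spec_lsOfLsNonUnique ls out) := by unfold Spec_lsOfLsNonUnique; infer_instance

-- ===== CLAIM =====
def Claim_equal_lsOfLsNonUnique : Prop := ∀ (ls : List Int), Dom_lsOfLsNonUnique ls → Spec_lsOfLsNonUnique ls (lsOfLsNonUnique ls)

-- ===== LEMMAS AND PROOFS =====

-- the maximal runs of a list, the common characterisation both ports are reduced to
def stepRev (runs : List (List Int)) (x : Int) : List (List Int) :=
  match runs with
  | (y :: g) :: gs => if y == x then (x :: y :: g) :: gs else [x] :: (y :: g) :: gs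
  | _ => [x] :: runs

def runsB : List Int → List (List Int)
  | [] => []
  | x :: xs => stepRev (runsB xs) x

-- A's loop, with the accumulator pulled out and the final flush inlined
def loopA : Int → List Int → List Int → List (List Int)
  | _, tmp, [] => if tmp.length > 1 then [tmp] else []
  | last, tmp, k :: rest =>
      if k = last then loopA last (tmp ++ [k]) rest
      else (if tmp.length > 1 then [tmp] else []) ++ loopA k [k] rest

lemma foldA_eq_loopA (rest : List Int) : ∀ (last : Int) (lol : List (List Int)) (tmp : List Int),
    (if (rest.foldl stepA (last, lol, tmp)).2.2.length > 1
     then (rest.foldl stepA (last, lol, tmp)).2.1 ++ [(rest.foldl stepA (last, lol, tmp)).2.2]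
     else (rest.foldl stepA (last, lol, tmp)).2.1) = lol ++ loopA last tmp rest := by
  induction rest with
  | nil => intro last lol tmp; by_cases h : tmp.length > 1 <;> simp [loopA, h, List.foldl]
  | cons k rest ih =>
    intro last lol tmp
    by_cases h : k = last
    · simp [List.foldl, stepA, h, loopA, ih]
    · by_cases h2 : tmp.length > 1 <;>
        simp [List.foldl, stepA, h, loopA, ih, h2, List.append_assoc]

lemma runsB_cons_head (x : Int) (xs : List Int) : ∃ g gs, runsB (x :: xs) = (x :: g) :: gs := by
  show ∃ g gs, stepRev (runsB xs) x = (x :: g) :: gs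
  match hr : runsB xs with
  | [] => exact ⟨[], [], rfl⟩
  | [] :: gs => exact ⟨[], [] :: gs, rfl⟩
  | (y :: g) :: gs =>
    by_cases h : y = x
    · exact ⟨y :: g, gs, by simp [stepRev, h]⟩
    · exact ⟨[], (y :: g) :: gs, by simp [stepRev, h]⟩

-- prepending a nonempty constant block whose value differs from the head of ys
lemma runsB_const_append (tmp : List Int) (c : Int) (ys : List Int)
    (hne : tmp ≠ []) (hall : ∀ a ∈ tmp, a = c)
    (hys : ys = [] ∨ ∃ k rest, ys = k :: rest ∧ k ≠ c) :
    runsB (tmp ++ ys) = tmp :: runsB ys := by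
  induction tmp with
  | nil => exact absurd rfl hne
  | cons a tmp' ih =>
    have ha : a = c := hall a (by simp)
    subst ha
    cases tmp' with
    | nil =>
      rcases hys with h | ⟨k, rest, h, hk⟩
      · subst h; rfl
      · subst h
        obtain ⟨g, gs, hg⟩ := runsB_cons_head k rest
        show stepRev (runsB (k :: rest)) a = [a] :: runsB (k :: rest)
        rw [hg]; simp [stepRev, hk]
    | cons b tmp'' =>
      have hb : b = a := hall b (by simp) ▸ (hall a (by simp))
      have ih' := ih (by simp) (fun x hx => hall x (by simp [hx]))
      show stepRev (runsB ((b :: tmp'') ++ ys)) a = (a :: b :: tmp'') :: runsB ys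
      rw [ih']
      have : b = a := by
        have := hall b (by simp); have := hall a (by simp); omega
      subst this
      simp [stepRev]

lemma loopA_eq_filter_runsB (rest : List Int) : ∀ (c : Int) (tmp : List Int),
    tmp ≠ [] → (∀ a ∈ tmp, a = c) →
    loopA c tmp rest = (runsB (tmp ++ rest)).filter (fun g => g.length > 1) := by
  induction rest with
  | nil =>
    intro c tmp hne hall
    have hr := runsB_const_append tmp c [] hne hall (Or.inl rfl)
    simp only [List.append_nil] at hr
    rw [List.append_nil, hr]
    by_cases h : tmp.length > 1 <;> simp [loopA, runsB, List.filter, h]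
  | cons k rest ih =>
    intro c tmp hne hall
    by_cases h : k = c
    · have : loopA c tmp (k :: rest) = loopA c (tmp ++ [k]) rest := by simp [loopA, h]
      rw [this, ih c (tmp ++ [k]) (by simp) (by intro a ha; rcases List.mem_append.mp ha with h' | h'
                                                · exact hall a h'
                                                · simp at h'; omega)]
      simp
    · have hs : loopA c tmp (k :: rest) =
          (if tmp.length > 1 then [tmp] else []) ++ loopA k [k] rest := by simp [loopA, h]
      rw [hs, ih k [k] (by simp) (by simp),
          runsB_const_append tmp c (k :: rest) hne hall (Or.inr ⟨k, rest, rfl, h⟩)]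
      by_cases h2 : tmp.length > 1 <;> simp [List.filter, h2]

lemma A_eq_filter (h : Int) (t : List Int) (hlen : ¬ (h :: t).length ≤ 1) :
    lsOfLsNonUnique (h :: t) = (runsB (h :: t)).filter (fun g => g.length > 1) := by
  unfold lsOfLsNonUnique
  rw [if_neg hlen]
  show (if (t.foldl stepA (h, ([] : List (List Int)), [h])).2.2.length > 1
        then (t.foldl stepA (h, ([] : List (List Int)), [h])).2.1 ++ [(t.foldl stepA (h, ([] : List (List Int)), [h])).2.2]
        else (t.foldl stepA (h, ([] : List (List Int)), [h])).2.1) = _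
  rw [foldA_eq_loopA t h [] [h], List.nil_append,
      loopA_eq_filter_runsB t h [h] (by simp) (by simp)]
  rfl

-- ===== B-side lemmas: boundaries and slices give the same runs =====

-- 1-based positions where an element differs from its predecessor, over Nat
def diffsN : List Int → List Nat
  | x :: y :: t => if x = y then (diffsN (y :: t)).map (· + 1) else 1 :: (diffsN (y :: t)).map (· + 1)
  | _ => []

lemma enum_diffs_aux (ls : List Int) : ∀ s : Int,
    ((PySem.List.enumerate (ls.zip ls.tail) s).filter (fun p => p.2.1 != p.2.2)).map
        (fun p => p.1 + 1)
      = (diffsN ls).map (fun k : Nat => (k : Int) + s) := by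
  induction ls with
  | nil => intro s; simp [diffsN, PySem.List.enumerate_nil]
  | cons x t ih =>
    intro s
    cases t with
    | nil => simp [diffsN, PySem.List.enumerate_nil]
    | cons y t' =>
      have hz : (x :: y :: t').zip (x :: y :: t').tail = (x, y) :: ((y :: t').zip t') := by simp
      have hz2 : (y :: t').zip (y :: t').tail = (y :: t').zip t' := by simp
      rw [hz, PySem.List.enumerate_cons, List.filter_cons, ← hz2]
      by_cases h : x = y
      · have hc : ((s, x, y).2.1 != (s, x, y).2.2) = false := by simp [h]
        rw [hc]
        simp only [Bool.false_eq_true, if_false]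
        rw [ih (s + 1)]
        simp only [diffsN, if_pos h, List.map_map]
        apply List.map_congr_left
        intro k _
        simp only [Function.comp]
        push_cast
        ring
      · have hc : ((s, x, y).2.1 != (s, x, y).2.2) = true := by simp [h]
        rw [hc]
        simp only [if_true]
        rw [List.map_cons, ih (s + 1)]
        simp only [diffsN, if_neg h, List.map_cons, List.map_map, List.cons.injEq]
        refine ⟨by simp [Int.add_comm], ?_⟩
        apply List.map_congr_left
        intro k _
        simp only [Function.comp]
        push_cast
        ring

-- the Nat-level form of B's second pass
def outN (ls : List Int) : List (List Int) :=
  let bs : List Nat := 0 :: diffsN ls ++ [ls.length]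
  ((bs.zip bs.tail).filter (fun p => p.1 + 1 < p.2)).map
    (fun p => (ls.drop p.1).take (p.2 - p.1))

lemma zip_tail_map_add (bs : List Nat) (L : Nat) :
    ((bs.map (· + L)).zip (bs.map (· + L)).tail)
      = (bs.zip bs.tail).map (fun p => (p.1 + L, p.2 + L)) := by
  rw [← List.map_tail, List.zip_map]
  rfl

lemma diffs_const_append (r : List Int) : ∀ (c : Int) (rest : List Int),
    (∀ a ∈ r, a = c) → (rest = [] ∨ ∃ y t', rest = y :: t' ∧ y ≠ c) →
    diffsN (c :: r ++ rest)
      = if rest.isEmpty then [] else (r.length + 1) :: (diffsN rest).map (· + (r.length + 1)) := by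
  induction r with
  | nil =>
    intro c rest _ hys
    rcases hys with h | ⟨y, t', h, hy⟩
    · subst h; simp [diffsN]
    · subst h
      have hstep : diffsN (c :: y :: t') = 1 :: (diffsN (y :: t')).map (· + 1) := by
        rw [diffsN, if_neg (fun hh : c = y => hy hh.symm)]
      simp [hstep]
  | cons a r' ih =>
    intro c rest hall hys
    have ha : a = c := hall a (by simp); subst ha
    have hstep : diffsN (a :: (a :: r') ++ rest) = (diffsN (a :: r' ++ rest)).map (· + 1) := by
      simp [diffsN]
    rw [hstep, ih a rest (fun x hx => hall x (by simp [hx])) hys]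
    by_cases h : rest.isEmpty
    · simp [h]
    · simp only [h, Bool.false_eq_true, if_false, List.map_cons, List.map_map]
      refine congrArg₂ List.cons (by simp) ?_
      apply List.map_congr_left; intro k _; simp [Function.comp]; omega

lemma outN_const_append (r : List Int) (c : Int) (rest : List Int)
    (hall : ∀ a ∈ r, a = c) (hys : rest = [] ∨ ∃ y t', rest = y :: t' ∧ y ≠ c) :
    outN (c :: r ++ rest)
      = (if (c :: r).length > 1 then [c :: r] else []) ++ outN rest := by
  have hd := diffs_const_append r c rest hall hys
  rcases hys with hrest | ⟨y, t', hrest, hy⟩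
  · subst hrest
    simp only [List.isEmpty_nil, if_pos] at hd
    unfold outN
    simp only [List.append_nil] at hd ⊢
    rw [hd]
    by_cases h : 1 < r.length + 1
    · simp only [List.zip, List.tail]
      simp only [List.length_cons, diffsN, List.length_nil]
      simp [List.filter, h, List.take_of_length_le]
    · have : r.length = 0 := by omega
      have : r = [] := List.length_eq_zero_iff.mp this
      subst this
      simp [diffsN, List.filter]
  · subst hrest
    have hne : (y :: t').isEmpty = false := by simp
    rw [hne] at hd; simp only [Bool.false_eq_true, if_false] at hd
    set L := r.length + 1 with hL
    set rest := y :: t' with hrest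
    -- bounds of the whole list = 0 :: (bounds of rest shifted by L)
    have hlen : (c :: r ++ rest).length = rest.length + L := by simp [hL]; omega
    have hbs : (0 :: diffsN (c :: r ++ rest) ++ [(c :: r ++ rest).length] : List Nat)
        = 0 :: ((0 :: diffsN rest ++ [rest.length]).map (· + L)) := by
      rw [hd, hlen]; simp
    unfold outN
    rw [hbs]
    have hhead : ((0 :: diffsN rest ++ [rest.length]).map (· + L)).head? = some L := by
      simp
    obtain ⟨b0, bs', hmap⟩ : ∃ b0 bs', (0 :: diffsN rest ++ [rest.length]).map (· + L) = b0 :: bs' := by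
      exact ⟨_, _, rfl⟩
    have hb0 : b0 = L := by rw [hmap] at hhead; simpa using hhead
    subst hb0
    rw [hmap]
    show ((((0 : Nat) :: L :: bs').zip (L :: bs')).filter _).map _ = _
    have hzipcons : (((0 : Nat) :: L :: bs').zip (L :: bs')) = (0, L) :: ((L :: bs').zip bs') := by
      simp
    have htail : (L :: bs') = ((0 :: diffsN rest ++ [rest.length]).map (· + L)) := hmap.symm
    have hztail : ((L :: bs').zip bs')
        = (((0 :: diffsN rest ++ [rest.length]).zip (0 :: diffsN rest ++ [rest.length]).tail).map
            (fun p => (p.1 + L, p.2 + L))) := by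
      have := zip_tail_map_add (0 :: diffsN rest ++ [rest.length]) L
      rw [← htail] at this
      simpa using this
    rw [hzipcons, hztail]
    rw [List.filter_cons]
    have hslice0 : ((c :: r ++ rest).drop 0).take (L - 0) = c :: r := by
      simp only [List.drop_zero, Nat.sub_zero]
      rw [List.take_append_of_le_length (by simp [hL])]
      simp [hL, List.take_of_length_le]
    have hcond : ((fun p => decide (p.1 + 1 < p.2)) ∘ (fun p : Nat × Nat => (p.1 + L, p.2 + L)))
        = (fun p : Nat × Nat => decide (p.1 + 1 < p.2)) := by
      funext p; simp; omega
    have hsl : ((fun p : Nat × Nat => ((c :: r ++ rest).drop p.1).take (p.2 - p.1)) ∘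
          (fun p : Nat × Nat => (p.1 + L, p.2 + L)))
        = (fun p : Nat × Nat => (rest.drop p.1).take (p.2 - p.1)) := by
      funext p
      have hdrop : (c :: r ++ rest).drop (p.1 + L) = rest.drop p.1 := by
        rw [Nat.add_comm, ← List.drop_drop]
        congr 1
        rw [show L = (c :: r).length by simp [hL], List.drop_left]
      simp only [Function.comp]
      rw [hdrop]
      congr 1
      omega
    by_cases h1 : (c :: r).length > 1
    · have hdec : (decide ((0 : Nat) + 1 < L)) = true := by
        apply decide_eq_true
        simp only [List.length_cons] at h1
        omega
      rw [hdec]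
      simp only [if_true, List.map_cons, List.filter_map, List.map_map, hcond, hsl]
      rw [if_pos h1, hslice0]
      rfl
    · have hdec : (decide ((0 : Nat) + 1 < L)) = false := by
        apply decide_eq_false
        simp only [List.length_cons] at h1
        omega
      rw [hdec]
      simp only [Bool.false_eq_true, if_false, List.filter_map, List.map_map, hcond, hsl]
      rw [if_neg h1, List.nil_append]

-- split the leading run of value c
def splitRun (c : Int) : List Int → List Int × List Int
  | [] => ([], [])
  | x :: t => if x = c then ((splitRun c t).1.cons x, (splitRun c t).2) else ([], x :: t)

lemma splitRun_spec (c : Int) (t : List Int) :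
    t = (splitRun c t).1 ++ (splitRun c t).2 ∧ (∀ a ∈ (splitRun c t).1, a = c) ∧
    ((splitRun c t).2 = [] ∨ ∃ y t', (splitRun c t).2 = y :: t' ∧ y ≠ c) := by
  induction t with
  | nil => simp [splitRun]
  | cons x t ih =>
    by_cases h : x = c
    · obtain ⟨h1, h2, h3⟩ := ih
      refine ⟨?_, ?_, ?_⟩ <;> simp [splitRun, h]
      · exact h1
      · exact h2
      · tauto
    · refine ⟨?_, ?_, ?_⟩ <;> simp [splitRun, h]

lemma splitRun_len (c : Int) (t : List Int) : (splitRun c t).2.length ≤ t.length := by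
  have h := congrArg List.length (splitRun_spec c t).1
  simp only [List.length_append] at h
  omega

lemma outN_eq_filter : ∀ (n : Nat) (ls : List Int), ls.length ≤ n → ls ≠ [] →
    outN ls = (runsB ls).filter (fun g => g.length > 1) := by
  intro n
  induction n with
  | zero => intro ls hle hne; cases ls with
    | nil => exact absurd rfl hne
    | cons c t => simp at hle
  | succ n ih =>
    intro ls hle hne
    cases ls with
    | nil => exact absurd rfl hne
    | cons c t =>
      obtain ⟨h1, h2, h3⟩ := splitRun_spec c t
      set r := (splitRun c t).1
      set rest := (splitRun c t).2
      have hls : c :: t = (c :: r) ++ rest := by rw [h1]; simp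
      rw [hls]
      have hruns : runsB ((c :: r) ++ rest) = (c :: r) :: runsB rest :=
        runsB_const_append (c :: r) c rest (by simp)
          (by
            intro a ha
            rcases List.mem_cons.mp ha with h | h
            · exact h
            · exact h2 a h) h3
      have hout : outN ((c :: r) ++ rest)
          = (if (c :: r).length > 1 then [c :: r] else []) ++ outN rest := by
        have := outN_const_append r c rest h2 h3
        simpa using this
      rw [hruns, hout, List.filter_cons]
      rcases h3 with hr0 | ⟨y, t', hr0, _⟩
      · rw [hr0]
        have houtnil : outN [] = [] := rfl
        by_cases h : 0 < r.length <;> simp [houtnil, runsB, h]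
      · have hrlen : rest.length ≤ n := by
          have h4 : rest.length ≤ t.length := splitRun_len c t
          simp at hle
          omega
        rw [ih rest hrlen (by rw [hr0]; simp)]
        by_cases h : 0 < r.length <;> simp [h]

lemma B_eq_filter (ls : List Int) (hlen : ¬ ls.length ≤ 1) :
    lsOfLsNonUnique_alt ls = (runsB ls).filter (fun g => g.length > 1) := by
  unfold lsOfLsNonUnique_alt
  rw [if_neg hlen]
  have hne : ls ≠ [] := by intro h; subst h; simp at hlen
  -- the Int bounds are the Nat bounds, cast
  have hd := enum_diffs_aux ls 0
  have hdiff : ((PySem.List.enumerate (ls.zip ls.tail) 0).filter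
        (fun p => p.2.1 != p.2.2)).map (fun p => p.1 + 1)
      = (diffsN ls).map (fun k : Nat => (k : Int)) := by
    rw [hd]
    apply List.map_congr_left; intro k _; simp
  have hbounds : (0 :: ((PySem.List.enumerate (ls.zip ls.tail) 0).filter
        (fun p => p.2.1 != p.2.2)).map (fun p => p.1 + 1) ++ [(ls.length : Int)] : List Int)
      = ((0 :: diffsN ls ++ [ls.length] : List Nat)).map (fun k : Nat => (k : Int)) := by
    rw [hdiff]; simp
  rw [← outN_eq_filter ls.length ls (le_refl _) hne]
  show ((((0 : Int) :: _ ++ _).zip (PySem.List.slice _ (some 1) none)).filter _).map _ = _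
  rw [PySem.List.slice_from_one, PySem.List.slice_from_one]
  rw [hbounds]
  set bs : List Nat := 0 :: diffsN ls ++ [ls.length] with hbs
  rw [show (bs.map (fun k : Nat => (k : Int))).tail = bs.tail.map (fun k : Nat => (k : Int)) from
        List.map_tail.symm,
      List.zip_map]
  unfold outN
  rw [← hbs, List.filter_map, List.map_map]
  have hcnd : ((fun p : Int × Int => decide (p.2 - p.1 > 1)) ∘
        Prod.map (fun k : Nat => (k : Int)) (fun k : Nat => (k : Int)))
      = (fun p : Nat × Nat => decide (p.1 + 1 < p.2)) := by
    funext p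
    simp only [Function.comp, Prod.map]
    rw [decide_eq_decide]
    omega
  have hslf : ((fun p : Int × Int => PySem.List.slice ls (some p.1) (some p.2)) ∘
        Prod.map (fun k : Nat => (k : Int)) (fun k : Nat => (k : Int)))
      = (fun p : Nat × Nat => (ls.drop p.1).take (p.2 - p.1)) := by
    funext p
    simp only [Function.comp, Prod.map]
    exact PySem.List.slice_natCast ls p.1 p.2
  rw [hcnd, hslf]

-- ===== VERDICT =====
theorem lsOfLsNonUnique_spec : Claim_equal_lsOfLsNonUnique := by
  intro ls _
  show lsOfLsNonUnique ls = lsOfLsNonUnique_alt ls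
  by_cases hlen : ls.length ≤ 1
  · unfold lsOfLsNonUnique lsOfLsNonUnique_alt
    rw [if_pos hlen, if_pos hlen]
  · rw [B_eq_filter ls hlen]
    cases ls with
    | nil => simp at hlen
    | cons h t => exact A_eq_filter h t hlen
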